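-- pv_equiv track=rewrite | github.com/nurbu/Ellucian-Scraper | ellucian_scraper.py | _check_days_match
-- ===== SOURCE A (Python) =====
-- def _check_days_match(meeting_time, target_days):
--     """Helper function to check if meeting days match filter"""
--     meeting_days = set()
--     day_mapping = {
--         'monday': 'M', 'tuesday': 'T', 'wednesday': 'W',
--         'thursday': 'R', 'friday': 'F', 'saturday': 'S', 'sunday': 'U'
--     }
--     for day, abbrev in day_mapping.items():
--         if meeting_time.get(day, False):
--             meeting_days.add(abbrev)
--     return target_days.issubset(meeting_days)
-- ===== SOURCE B (Python) =====
-- def _check_days_match(meeting_time, target_days):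
--     """Check if every target abbreviation names a day the section meets.
--     Early-return loop over target_days with an if/elif abbreviation decoder;
--     no set is ever built."""
--     for d in target_days:
--         if not _meets(meeting_time, d):
--             return False
--     return True
--
--
-- def _meets(meeting_time, abbrev):
--     if abbrev == 'M':
--         day = 'monday'
--     elif abbrev == 'T':
--         day = 'tuesday'
--     elif abbrev == 'W':
--         day = 'wednesday'
--     elif abbrev == 'R':
--         day = 'thursday'
--     elif abbrev == 'F':
--         day = 'friday'
--     elif abbrev == 'S':
--         day = 'saturday'
--     elif abbrev == 'U':
--         day = 'sunday'
--     else: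
--         return False
--     return bool(meeting_time.get(day, False))
-- ===== Notes on version B (the rewrite author's own statement) =====
-- stated objective: simpler
-- what changed: B never builds the meeting_days set or the day->abbrev dict: it is an early-return loop over target_days, decoding each abbreviation with an if/elif chain and looking it up directly in meeting_time.
import Mathlib
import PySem

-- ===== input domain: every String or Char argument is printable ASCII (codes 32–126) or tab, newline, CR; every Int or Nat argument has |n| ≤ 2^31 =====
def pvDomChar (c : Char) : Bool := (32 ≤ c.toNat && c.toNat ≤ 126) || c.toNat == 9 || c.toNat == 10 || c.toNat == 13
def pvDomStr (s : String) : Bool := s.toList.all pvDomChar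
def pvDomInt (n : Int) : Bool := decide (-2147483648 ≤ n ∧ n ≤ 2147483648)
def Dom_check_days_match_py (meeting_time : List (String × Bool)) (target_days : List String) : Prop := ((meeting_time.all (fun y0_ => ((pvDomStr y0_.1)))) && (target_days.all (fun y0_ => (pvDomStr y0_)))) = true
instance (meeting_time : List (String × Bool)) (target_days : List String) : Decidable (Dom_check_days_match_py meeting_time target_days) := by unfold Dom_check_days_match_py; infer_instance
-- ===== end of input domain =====

-- B replaces A's build-a-set-then-issubset with an early-return loop over target_days and an if/elif abbreviation decoder ("simpler").

-- ===== PORT A =====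
def check_days_match_py (meeting_time : List (String × Bool)) (target_days : List String) : Bool :=
  -- meeting_days = set(); for day, abbrev in day_mapping.items(): if meeting_time.get(day, False): meeting_days.add(abbrev)
  let day_mapping : List (String × String) :=
    [("monday", "M"), ("tuesday", "T"), ("wednesday", "W"),
     ("thursday", "R"), ("friday", "F"), ("saturday", "S"), ("sunday", "U")]
  let meeting_days : PySem.Set String :=
    day_mapping.foldl
      (fun s p => if (PySem.Dict.mk meeting_time).getD p.1 false then PySem.Set.add s p.2 else s)
      PySem.Set.empty
  PySem.Set.issubset target_days meeting_days

-- ===== PORT B =====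
-- helper _meets: decode the abbreviation by an if/elif chain, then look it up in meeting_time
def meets_py (meeting_time : List (String × Bool)) (ab : String) : Bool :=
  if ab = "M" then (PySem.Dict.mk meeting_time).getD "monday" false
  else if ab = "T" then (PySem.Dict.mk meeting_time).getD "tuesday" false
  else if ab = "W" then (PySem.Dict.mk meeting_time).getD "wednesday" false
  else if ab = "R" then (PySem.Dict.mk meeting_time).getD "thursday" false
  else if ab = "F" then (PySem.Dict.mk meeting_time).getD "friday" false
  else if ab = "S" then (PySem.Dict.mk meeting_time).getD "saturday" false
  else if ab = "U" then (PySem.Dict.mk meeting_time).getD "sunday" false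
  else false

-- the early-return loop: 'for d in target_days: if not _meets(...): return False' / 'return True'
def check_loop (meeting_time : List (String × Bool)) : List String → Bool
  | [] => true
  | d :: rest => if !(meets_py meeting_time d) then false else check_loop meeting_time rest

def check_days_match_py_alt (meeting_time : List (String × Bool)) (target_days : List String) : Bool :=
  check_loop meeting_time target_days

-- ===== PRECONDITION & SPEC =====
def Spec_check_days_match_py (meeting_time : List (String × Bool)) (target_days : List String) (out : Bool) : Prop := out = check_days_match_py_alt meeting_time target_days
instance (meeting_time : List (String × Bool)) (target_days : List String) (out : Bool) : Decidable (Spec_check_days_match_py meeting_time target_days out) := by unfold Spec_check_days_match_py; infer_instance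

-- ===== CLAIM (what is proved, stated in full; the proofs are below) =====
def Claim_equal_check_days_match_py : Prop := ∀ (meeting_time : List (String × Bool)) (target_days : List String), Dom_check_days_match_py meeting_time target_days → Spec_check_days_match_py meeting_time target_days (check_days_match_py meeting_time target_days)

-- ===== LEMMAS AND PROOFS =====

-- membership in a set built by a conditional-add loop
theorem mem_foldl_cond_add {α β : Type} [BEq α] [LawfulBEq α] (l : List β) (c : β → Bool) (f : β → α)
    (s : PySem.Set α) (d : α) :
    d ∈ l.foldl (fun s b => if c b then PySem.Set.add s (f b) else s) s ↔
      d ∈ s ∨ ∃ b ∈ l, c b = true ∧ d = f b := by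
  induction l generalizing s with
  | nil => simp
  | cons x xs ih =>
    simp only [List.foldl_cons]
    by_cases hc : c x = true
    · rw [if_pos hc, ih]
      simp only [PySem.Set.mem_add, List.mem_cons]
      aesop
    · rw [if_neg hc, ih]
      simp only [List.mem_cons]
      aesop

-- pointwise: "d is in A's meeting_days" = "B's _meets check"
theorem pointwise (meeting_time : List (String × Bool)) (d : String) :
    (PySem.Set.contains
      (([("monday", "M"), ("tuesday", "T"), ("wednesday", "W"),
         ("thursday", "R"), ("friday", "F"), ("saturday", "S"), ("sunday", "U")] :
          List (String × String)).foldl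
        (fun s p => if (PySem.Dict.mk meeting_time).getD p.1 false then PySem.Set.add s p.2 else s)
        PySem.Set.empty) d) = meets_py meeting_time d := by
  rw [Bool.eq_iff_iff, PySem.Set.contains_iff]
  rw [mem_foldl_cond_add _ (fun p => (PySem.Dict.mk meeting_time).getD p.1 false) Prod.snd]
  unfold meets_py
  by_cases h1 : d = "M"
  · subst h1; simp
  by_cases h2 : d = "T"
  · subst h2; simp
  by_cases h3 : d = "W"
  · subst h3; simp
  by_cases h4 : d = "R"
  · subst h4; simp
  by_cases h5 : d = "F"
  · subst h5; simp
  by_cases h6 : d = "S"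
  · subst h6; simp
  by_cases h7 : d = "U"
  · subst h7; simp
  · simp [Ne.symm h1, Ne.symm h2, Ne.symm h3, Ne.symm h4,
      Ne.symm h5, Ne.symm h6, Ne.symm h7, h1, h2, h3, h4, h5, h6, h7]

-- B's early-return loop is the conjunction of _meets over target_days
theorem check_loop_iff (meeting_time : List (String × Bool)) (l : List String) :
    check_loop meeting_time l = true ↔ ∀ d ∈ l, meets_py meeting_time d = true := by
  induction l with
  | nil => simp [check_loop]
  | cons x xs ih =>
    simp only [check_loop, List.mem_cons]
    by_cases h : meets_py meeting_time x = true <;> aesop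

-- ===== VERDICT (by name: the statement is the Claim_ definition above) =====
theorem check_days_match_py_spec : Claim_equal_check_days_match_py := by
  intro meeting_time target_days _
  unfold Spec_check_days_match_py check_days_match_py check_days_match_py_alt
  simp only []
  rw [Bool.eq_iff_iff, PySem.Set.issubset_iff, check_loop_iff]
  constructor
  · intro h d hd
    rw [← pointwise meeting_time d, PySem.Set.contains_iff]
    exact h d hd
  · intro h d hd
    rw [← PySem.Set.contains_iff, pointwise meeting_time d]
    exact h d hd
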